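-- pv_equiv track=rewrite | github.com/wyk18703232953/myResearch | codeComplex/scripts/assess_difficulty.py | _assess_code_length
-- ===== SOURCE A (Python) =====
-- def _assess_code_length(code):
--     """评估代码长度，返回0-5的分数"""
--     lines = code.split('\n')
--     non_empty_lines = [line for line in lines if line.strip()]
--     line_count = len(non_empty_lines)
--
--     if line_count < 10:
--         return 0
--     elif line_count < 30:
--         return 1
--     elif line_count < 50:
--         return 2
--     elif line_count < 100:
--         return 3
--     elif line_count < 200:
--         return 4
--     else:
--         return 5
-- ===== SOURCE B (Python) =====
-- def _assess_code_length(code):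
--     """评估代码长度，返回0-5的分数"""
--     # single char-level state machine: count lines containing a non-whitespace char
--     count = 0
--     has_content = False
--     for ch in code:
--         if ch == '\n':
--             count += has_content
--             has_content = False
--         elif not ch.isspace():
--             has_content = True
--     count += has_content
--     # early-exit walk of the threshold table
--     score = 0
--     for t in (10, 30, 50, 100, 200):
--         if count < t:
--             break
--         score += 1
--     return score
-- ===== Notes on version B (the rewrite author's own statement) =====
-- stated objective: alternative
-- what changed: Replaces split('\n')+filter+len with a single character-level state machine (count, has_content flag) over the raw string, and the if/elif ladder with an early-exit walk over the threshold table (10,30,50,100,200).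
import Mathlib
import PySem

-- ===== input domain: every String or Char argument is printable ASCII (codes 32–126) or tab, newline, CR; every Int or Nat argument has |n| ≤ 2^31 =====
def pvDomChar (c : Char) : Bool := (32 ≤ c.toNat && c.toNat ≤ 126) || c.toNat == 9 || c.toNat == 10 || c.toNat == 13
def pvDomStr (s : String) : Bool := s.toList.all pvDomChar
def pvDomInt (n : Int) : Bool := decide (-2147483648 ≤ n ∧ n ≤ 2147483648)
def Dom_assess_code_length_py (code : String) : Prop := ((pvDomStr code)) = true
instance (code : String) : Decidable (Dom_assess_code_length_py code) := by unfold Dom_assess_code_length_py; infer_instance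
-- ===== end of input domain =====

-- B replaces A's split('\n')+filter+len with a single character-level state machine and the
-- if/elif ladder with an early-exit walk over the threshold table (objective: alternative, same O(n) cost).


-- ===== PORT A =====
-- literal port of A: split on '\n', filter non-blank lines, len, then the if/elif ladder
def assess_code_length_py (code : String) : Int :=
  let lines := PySem.Chars.splitOn code.toList ['\n']
  let non_empty_lines := lines.filter (fun line => PySem.Chars.strip line ≠ [])
  let line_count : Int := PySem.List.len non_empty_lines
  if line_count < 10 then 0
  else if line_count < 30 then 1
  else if line_count < 50 then 2
  else if line_count < 100 then 3
  else if line_count < 200 then 4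
  else 5

-- ===== PORT B =====
-- one step of B's character state machine: (count, has_content) updated by one char
def altStep (st : Int × Bool) (ch : Char) : Int × Bool :=
  if ch = '\n' then (st.1 + (if st.2 then 1 else 0), false)
  else if ¬ PySem.Chars.isspace ch then (st.1, true)
  else st
-- B's early-exit walk of the threshold table ('break' = return score)
def altScoreGo (ts : List Int) (count : Int) (score : Int) : Int :=
  match ts with
  | [] => score
  | t :: ts' => if count < t then score else altScoreGo ts' count (score + 1)
-- port of B: char-level state machine over the raw string, then the threshold walk
def assess_code_length_py_alt (code : String) : Int :=
  let st := code.toList.foldl altStep (0, false)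
  let count := st.1 + (if st.2 then 1 else 0)
  altScoreGo [10, 30, 50, 100, 200] count 0

-- ===== PRECONDITION & SPEC =====
def Spec_assess_code_length_py (code : String) (out : Int) : Prop := out = assess_code_length_py_alt code
instance (code : String) (out : Int) : Decidable (Spec_assess_code_length_py code out) := by unfold Spec_assess_code_length_py; infer_instance

-- ===== CLAIM (what is proved, stated in full; the proofs are below) =====
def Claim_equal_assess_code_length_py : Prop := ∀ (code : String), Dom_assess_code_length_py code → Spec_assess_code_length_py code (assess_code_length_py code)

-- ===== LEMMAS AND PROOFS =====

-- a line is blank after strip iff every char is whitespace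
lemma strip_eq_nil_iff (xs : List Char) :
    PySem.Chars.strip xs = [] ↔ ∀ c ∈ xs, PySem.Chars.isspace c := by
  unfold PySem.Chars.strip PySem.Chars.rstrip PySem.Chars.lstrip
  constructor
  · intro h c hc
    rw [List.reverse_eq_nil_iff, List.dropWhile_eq_nil_iff] at h
    rw [← List.takeWhile_append_dropWhile (p := PySem.Chars.isspace) (l := xs)] at hc
    rcases List.mem_append.1 hc with h1 | h1
    · exact List.mem_takeWhile_imp h1
    · exact h c (List.mem_reverse.2 h1)
  · intro h
    have : xs.dropWhile PySem.Chars.isspace = [] := List.dropWhile_eq_nil_iff.2 (fun c hc => h c hc)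
    simp [this]

-- the reversed current segment is blank iff B's has_content flag is off
lemma strip_rev_nil (cur : List Char) :
    (PySem.Chars.strip cur.reverse = []) ↔ (cur.any (fun ch => ¬ PySem.Chars.isspace ch)) = false := by
  rw [strip_eq_nil_iff]
  simp

-- number of non-blank lines, as an Int
def nInt (xss : List (List Char)) : Int :=
  ((xss.filter (fun line => PySem.Chars.strip line ≠ [])).length : Int)

-- unfolding lemmas for splitOn's fuelled accumulator recursion (sep = ['\n'])
lemma go_nil (fuel : Nat) (cur : List Char) (acc : List (List Char)) :
    PySem.Chars.splitOn.go ['\n'] fuel [] cur acc = (cur.reverse :: acc).reverse := by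
  cases fuel <;> rw [PySem.Chars.splitOn.go] <;> simp

lemma go_newline (fuel : Nat) (rest cur : List Char) (acc : List (List Char)) :
    PySem.Chars.splitOn.go ['\n'] (fuel+1) ('\n'::rest) cur acc
      = PySem.Chars.splitOn.go ['\n'] fuel rest [] (cur.reverse :: acc) := by
  rw [PySem.Chars.splitOn.go]; simp [List.isPrefixOf]

lemma go_other (fuel : Nat) (c : Char) (hc : c ≠ '\n') (rest cur : List Char) (acc : List (List Char)) :
    PySem.Chars.splitOn.go ['\n'] (fuel+1) (c::rest) cur acc
      = PySem.Chars.splitOn.go ['\n'] fuel rest (c :: cur) acc := by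
  rw [PySem.Chars.splitOn.go]
  simp [List.isPrefixOf]
  intro h; cases hc h.symm

lemma nInt_reverse (xss : List (List Char)) : nInt xss.reverse = nInt xss := by
  simp [nInt]

-- invariant of B's char state machine vs splitOn's accumulator recursion
lemma key (l : List Char) : ∀ (fuel : Nat), l.length ≤ fuel →
    ∀ (cur : List Char) (acc : List (List Char)) (k : Int) (b : Bool),
    b = cur.any (fun ch => ¬ PySem.Chars.isspace ch) →
    (let st := l.foldl altStep (k, b); st.1 + (if st.2 then 1 else 0))
      = k + nInt (PySem.Chars.splitOn.go ['\n'] fuel l cur acc) - nInt acc := by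
  induction l with
  | nil =>
    intro fuel _ cur acc k b hb
    rw [go_nil, nInt_reverse]
    simp only [List.foldl_nil, nInt, List.filter]
    by_cases hcur : PySem.Chars.strip cur.reverse = []
    · have hb' : b = false := by rw [hb]; exact (strip_rev_nil cur).1 hcur
      simp [hcur, hb']
    · have hb' : b = true := by
        rw [hb]; by_contra h
        exact hcur ((strip_rev_nil cur).2 (by simpa using h))
      simp [hcur, hb']
      ring
  | cons c rest ih =>
    intro fuel hf cur acc k b hb
    cases fuel with
    | zero => simp at hf
    | succ f =>
      have hf' : rest.length ≤ f := by simpa using hf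
      by_cases hc : c = '\n'
      · subst hc
        rw [go_newline]
        have hrec := ih f hf' [] (cur.reverse :: acc) (k + (if b then 1 else 0)) false (by simp)
        have hacc : nInt (cur.reverse :: acc) = nInt acc + (if b then 1 else 0) := by
          simp only [nInt, List.filter]
          by_cases hcur : PySem.Chars.strip cur.reverse = []
          · have hb' : b = false := by rw [hb]; exact (strip_rev_nil cur).1 hcur
            simp [hcur, hb']
          · have hb' : b = true := by
              rw [hb]; by_contra h
              exact hcur ((strip_rev_nil cur).2 (by simpa using h))
            simp [hcur, hb']
        simp only [List.foldl_cons] at hrec ⊢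
        simp only [altStep, if_pos] at hrec ⊢
        rw [hrec, hacc]; ring
      · rw [go_other f c hc]
        by_cases hsp : PySem.Chars.isspace c
        · have := ih f hf' (c :: cur) acc k b (by simp [hb, hsp])
          simp only [List.foldl_cons, altStep, if_neg hc, hsp] at this ⊢
          simpa using this
        · have := ih f hf' (c :: cur) acc k true (by simp [hsp])
          simp only [List.foldl_cons, altStep, if_neg hc, hsp] at this ⊢
          simpa using this

-- the if/elif ladder equals the early-exit threshold walk for a nonnegative count
lemma ladder_eq_walk (n : Int) (_hn : 0 ≤ n) :
    (if n < 10 then (0:Int) else if n < 30 then 1 else if n < 50 then 2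
     else if n < 100 then 3 else if n < 200 then 4 else 5) =
    altScoreGo [10, 30, 50, 100, 200] n 0 := by
  simp only [altScoreGo]
  split_ifs <;> omega

-- ===== VERDICT (by name: the statement is the Claim_ definition above) =====
theorem assess_code_length_py_spec : Claim_equal_assess_code_length_py := by
  intro code _
  show assess_code_length_py code = assess_code_length_py_alt code
  unfold assess_code_length_py assess_code_length_py_alt
  have hcount := key code.toList (code.toList.length + 1) (by omega) [] [] 0 false (by simp)
  simp only [nInt, List.filter_nil, List.length_nil, Int.natCast_zero, zero_add, sub_zero] at hcount
  have hsplit : PySem.Chars.splitOn code.toList ['\n']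
      = PySem.Chars.splitOn.go ['\n'] (code.toList.length + 1) code.toList [] [] := rfl
  simp only [PySem.List.len, hsplit]
  rw [hcount]
  exact ladder_eq_walk _ (by positivity)
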